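-- pv_equiv track=rewrite | github.com/ailabteam/CodesignalPython | maxSumSegments.py | maxSumSegments
-- ===== SOURCE A (Python) =====
-- def maxSumSegments(inputArray):
--     res = [0 for i in range(len(inputArray))]
--     for i in range(1, len(inputArray) + 1):
--         sum = 0
--         mxSum = 0
--         idx = -1
--         for j in range(len(inputArray)):
--             sum += inputArray[j]
--             if j >= i:
--                 sum -= inputArray[j-i]
--             if j >= i - 1 and (idx == -1 or sum > mxSum):
--                 mxSum = sum
--                 idx = j - i + 1
--         res[i-1] = idx
--     return res
-- ===== SOURCE B (Python) =====
-- def maxSumSegments(inputArray):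
--     # Prefix-sum table: window sums become O(1) differences; inner scan per length
--     # only visits valid starts. Earliest max kept via strict > in increasing-s scan.
--     n = len(inputArray)
--     P = [0] * (n + 1)
--     for k in range(n):
--         P[k + 1] = P[k] + inputArray[k]
--     res = []
--     for i in range(1, n + 1):
--         best = P[i] - P[0]
--         idx = 0
--         for s in range(1, n - i + 1):
--             w = P[s + i] - P[s]
--             if w > best:
--                 best = w
--                 idx = s
--         res.append(idx)
--     return res
-- ===== Notes on version B (the rewrite author's own statement) =====
-- stated objective: faster
-- what changed: Replaces A's per-length sliding-window maintenance over all n positions by a precomputed prefix-sum table, so each window sum is a single difference and each length scans only its n-i+1 valid starts.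
import Mathlib
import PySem

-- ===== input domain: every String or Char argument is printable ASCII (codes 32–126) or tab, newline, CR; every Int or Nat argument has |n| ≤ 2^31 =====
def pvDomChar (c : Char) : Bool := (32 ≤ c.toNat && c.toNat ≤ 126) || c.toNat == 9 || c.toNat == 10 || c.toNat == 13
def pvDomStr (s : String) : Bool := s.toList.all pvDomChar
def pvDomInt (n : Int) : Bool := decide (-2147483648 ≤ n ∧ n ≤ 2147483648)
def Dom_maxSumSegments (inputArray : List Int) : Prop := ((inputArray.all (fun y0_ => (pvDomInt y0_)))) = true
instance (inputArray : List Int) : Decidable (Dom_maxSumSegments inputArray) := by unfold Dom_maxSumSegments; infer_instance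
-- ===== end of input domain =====

-- B replaces A's per-length sliding-window maintenance by a prefix-sum table and a
-- scan over only the valid window starts (objective: faster by a constant factor).

-- ===== PORT A =====
-- inner loop body; all list indices are provably in range, so getD is exact
def stepA (a : List Int) (i : Nat) (st : Int × Int × Int) (j : Nat) : Int × Int × Int :=
  let s1 := st.1 + a.getD j 0                                -- sum += inputArray[j]
  let s2 := if i ≤ j then s1 - a.getD (j - i) 0 else s1      -- if j >= i: sum -= inputArray[j-i]
  if i - 1 ≤ j ∧ (st.2.2 = -1 ∨ s2 > st.2.1) then            -- if j >= i-1 and (idx == -1 or sum > mxSum)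
    (s2, s2, (j : Int) - (i : Int) + 1)
  else (s2, st.2.1, st.2.2)

def innerA (a : List Int) (i : Nat) : Int :=
  ((List.range a.length).foldl (stepA a i) (0, 0, -1)).2.2

def maxSumSegments (inputArray : List Int) : List Int :=
  (List.range inputArray.length).foldl
    (fun r k => r.set k (innerA inputArray (k + 1)))         -- res[i-1] = idx, i = k+1
    (List.replicate inputArray.length 0)

-- ===== PORT B =====
-- prefix-sum table: pfxB a 0 = [P 0, P 1, …, P n]
def pfxB : List Int → Int → List Int
  | [], acc => [acc]
  | x :: xs, acc => acc :: pfxB xs (acc + x)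

def stepB (P : List Int) (i : Nat) (st : Int × Int) (s : Nat) : Int × Int :=
  let w := P.getD (s + i) 0 - P.getD s 0
  if w > st.1 then (w, (s : Int)) else st

def innerB (P : List Int) (n i : Nat) : Int :=
  ((List.range' 1 (n - i)).foldl (stepB P i) (P.getD i 0 - P.getD 0 0, 0)).2

def maxSumSegments_alt (inputArray : List Int) : List Int :=
  let P := pfxB inputArray 0
  (List.range inputArray.length).map (fun k => innerB P inputArray.length (k + 1))

-- ===== PRECONDITION & SPEC =====
def Spec_maxSumSegments (inputArray : List Int) (out : List Int) : Prop := out = maxSumSegments_alt inputArray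
instance (inputArray : List Int) (out : List Int) : Decidable (Spec_maxSumSegments inputArray out) := by unfold Spec_maxSumSegments; infer_instance

-- ===== CLAIM (what is proved, stated in full; the proofs are below) =====
def Claim_equal_maxSumSegments : Prop := ∀ (inputArray : List Int), Dom_maxSumSegments inputArray → Spec_maxSumSegments inputArray (maxSumSegments inputArray)

-- ===== LEMMAS AND PROOFS =====

-- prefix sums: pfxB computes partial sums of 'take'
theorem pfxB_getD (xs : List Int) (acc : Int) (k : Nat) (hk : k ≤ xs.length) :
    (pfxB xs acc).getD k 0 = acc + (xs.take k).sum := by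
  induction xs generalizing acc k with
  | nil =>
    have : k = 0 := by simpa using hk
    subst this; simp [pfxB]
  | cons x xs ih =>
    cases k with
    | zero => simp [pfxB]
    | succ k =>
      simp only [pfxB, List.getD_cons_succ, List.take_succ_cons, List.sum_cons]
      rw [ih _ _ (by simpa using hk)]; ring

-- sum of one more element
theorem take_sum_succ (a : List Int) (m : Nat) (hm : m < a.length) :
    (a.take (m + 1)).sum = (a.take m).sum + a.getD m 0 := by
  rw [List.sum_take_succ a m hm, List.getD_eq_getElem a 0 hm]

-- Phase 1 of A's inner loop: before the first valid window, only 'sum' changes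
theorem phaseA1 (a : List Int) (i : Nat) (c t : Nat)
    (h : t + c ≤ i - 1) (hn : i - 1 ≤ a.length) :
    (List.range' t c).foldl (stepA a i) ((a.take t).sum, 0, -1)
      = ((a.take (t + c)).sum, 0, -1) := by
  induction c generalizing t with
  | zero => simp
  | succ c ih =>
    rw [List.range'_succ, List.foldl_cons]
    have ht : t < i - 1 := by omega
    have hstep : stepA a i ((a.take t).sum, 0, -1) t = ((a.take (t+1)).sum, 0, -1) := by
      simp only [stepA]
      rw [if_neg (by omega), if_neg (by omega)]
      rw [take_sum_succ a t (by omega)]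
    rw [hstep, ih (t + 1) (by omega)]
    have heq : t + 1 + c = t + (c + 1) := by omega
    rw [heq]

-- Phase 2: from the first window on, A's state's (mxSum, idx) tracks B's scan
theorem phaseA2 (a : List Int) (i : Nat) (hi : 1 ≤ i)
    (c s : Nat) (hs : 1 ≤ s) (hsc : s + c = a.length - i + 1) (hin : i ≤ a.length)
    (m idx : Int) (hidx : 0 ≤ idx) :
    ((List.range' (s + i - 1) c).foldl (stepA a i)
        ((a.take (s + i - 1)).sum - (a.take (s - 1)).sum, m, idx)).2
      = (List.range' s c).foldl (stepB (pfxB a 0) i) (m, idx) := by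
  induction c generalizing s m idx with
  | zero => simp
  | succ c ih =>
    rw [List.range'_succ, List.range'_succ, List.foldl_cons, List.foldl_cons]
    have hsn : s + i - 1 < a.length := by omega
    have hs1 : s - 1 < a.length := by omega
    have h1 := take_sum_succ a (s + i - 1) hsn
    rw [show s + i - 1 + 1 = s + i from by omega] at h1
    have h2 := take_sum_succ a (s - 1) hs1
    rw [show s - 1 + 1 = s from by omega] at h2
    have hsum1 : (a.take (s + i - 1)).sum - (a.take (s - 1)).sum + a.getD (s + i - 1) 0
        = (a.take (s + i)).sum - (a.take (s - 1)).sum := by rw [h1]; ring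
    have hsum2 : (a.take (s + i)).sum - (a.take (s - 1)).sum - a.getD (s - 1) 0
        = (a.take (s + i)).sum - (a.take s).sum := by rw [h2]; ring
    have hw : (pfxB a 0).getD (s + i) 0 - (pfxB a 0).getD s 0
        = (a.take (s + i)).sum - (a.take s).sum := by
      rw [pfxB_getD a 0 (s + i) (by omega), pfxB_getD a 0 s (by omega)]; ring
    have hstep : stepA a i ((a.take (s + i - 1)).sum - (a.take (s - 1)).sum, m, idx) (s + i - 1)
        = ((a.take (s + i)).sum - (a.take s).sum,
           (stepB (pfxB a 0) i (m, idx) s)) := by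
      simp only [stepA, stepB, hw]
      rw [if_pos (show i ≤ s + i - 1 by omega)]
      rw [show s + i - 1 - i = s - 1 by omega, hsum1, hsum2]
      by_cases hgt : (a.take (s + i)).sum - (a.take s).sum > m
      · rw [if_pos ⟨by omega, Or.inr hgt⟩, if_pos hgt]
        simp only [Prod.mk.injEq, true_and]
        omega
      · rw [if_neg ?_, if_neg hgt]
        rintro ⟨-, h | h⟩
        · omega
        · exact hgt h
    rw [hstep]
    have hidx' : 0 ≤ (stepB (pfxB a 0) i (m, idx) s).2 := by
      simp only [stepB]
      split
      · exact Int.natCast_nonneg s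
      · exact hidx
    have hrec := ih (s + 1) (by omega) (by omega)
      ((stepB (pfxB a 0) i (m, idx) s).1) ((stepB (pfxB a 0) i (m, idx) s).2) hidx'
    rw [show s + 1 + i - 1 = s + i from by omega, show s + 1 - 1 = s from by omega] at hrec
    rw [show s + i - 1 + 1 = s + i from by omega]
    exact hrec

-- the two inner computations agree for valid lengths
theorem inner_eq (a : List Int) (i : Nat) (hi : 1 ≤ i) (hin : i ≤ a.length) :
    innerA a i = innerB (pfxB a 0) a.length i := by
  unfold innerA innerB
  rw [List.range_eq_range']
  have hsplit := List.range'_append (s := 0) (m := i - 1) (n := (a.length - i) + 1) (step := 1)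
  rw [show 0 + 1 * (i - 1) = i - 1 from by omega,
      show (i - 1) + ((a.length - i) + 1) = a.length from by omega,
      List.range'_succ, show i - 1 + 1 = i from by omega] at hsplit
  rw [← hsplit, List.foldl_append]
  have h1 : (List.range' 0 (i - 1)).foldl (stepA a i) (0, 0, -1)
      = ((a.take (i - 1)).sum, 0, -1) := by
    have := phaseA1 a i (i - 1) 0 (by omega) (by omega)
    simpa using this
  rw [h1, List.foldl_cons]
  have hstep : stepA a i ((a.take (i - 1)).sum, 0, -1) (i - 1)
      = ((a.take i).sum, (a.take i).sum, 0) := by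
    have g1 : ¬ (i ≤ i - 1) := by omega
    have hs : (a.take (i - 1)).sum + a.getD (i - 1) 0 = (a.take i).sum := by
      rw [← take_sum_succ a (i - 1) (by omega), show i - 1 + 1 = i from by omega]
    simp only [stepA, g1, if_false, hs]
    rw [if_pos ⟨le_refl _, Or.inl trivial⟩]
    simp only [Prod.mk.injEq, true_and]
    omega
  rw [hstep]
  have hinit : (pfxB a 0).getD i 0 - (pfxB a 0).getD 0 0 = (a.take i).sum := by
    rw [pfxB_getD a 0 i (by omega), pfxB_getD a 0 0 (by omega)]; simp
  rw [hinit]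
  have hph := phaseA2 a i hi (a.length - i) 1 (le_refl _) (by omega) hin
    ((a.take i).sum) 0 (by omega)
  rw [show 1 + i - 1 = i from by omega] at hph
  simp only [Nat.sub_self, List.take_zero, List.sum_nil, sub_zero] at hph
  rw [hph]

-- filling a zero-initialised array left to right is a map
theorem foldl_set_range (f : Nat → Int) (n m : Nat) (hm : m ≤ n) :
    (List.range m).foldl (fun r k => r.set k (f k)) (List.replicate n 0)
      = (List.range m).map f ++ List.replicate (n - m) 0 := by
  induction m with
  | zero => simp
  | succ m ih =>
    rw [List.range_succ, List.foldl_append, ih (by omega), List.foldl_cons, List.foldl_nil]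
    rw [List.map_append, List.map_singleton, List.append_assoc]
    rw [List.set_append_right _ _ (by simp)]
    simp only [List.length_map, List.length_range, Nat.sub_self]
    rw [show n - m = (n - (m + 1)) + 1 from by omega, List.replicate_succ, List.set_cons_zero]
    simp

-- ===== VERDICT (by name: the statement is the Claim_ definition above) =====
theorem maxSumSegments_spec : Claim_equal_maxSumSegments := by
  intro a _
  unfold Spec_maxSumSegments maxSumSegments maxSumSegments_alt
  rw [foldl_set_range _ a.length a.length (le_refl _)]
  simp only [Nat.sub_self, List.replicate_zero, List.append_nil]
  refine List.map_congr_left fun k hk => ?_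
  rw [List.mem_range] at hk
  exact inner_eq a (k + 1) (by omega) (by omega)
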